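-- pv_equiv track=rewrite | github.com/zhukaiyue2005/Engram4Rec | with_SASRec_collaborative_engram/inference.py | _trim_token_span_boundaries
-- ===== SOURCE A (Python) =====
-- from typing import Dict, List, Optional, Tuple
--
-- def _trim_token_span_boundaries(
--     prompt_text: str,
--     offsets: List[Tuple[int, int]],
--     token_span: List[int],
-- ) -> List[int]:
--     start_idx, end_idx = token_span
--
--     while start_idx < end_idx:
--         char_start, char_end = offsets[start_idx]
--         token_text = prompt_text[char_start:char_end]
--         if token_text and not all(ch.isspace() or not ch.isalnum() for ch in token_text):
--             break
--         start_idx += 1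
--
--     while end_idx > start_idx:
--         char_start, char_end = offsets[end_idx - 1]
--         token_text = prompt_text[char_start:char_end]
--         if token_text and not all(ch.isspace() or not ch.isalnum() for ch in token_text):
--             break
--         end_idx -= 1
--
--     return [start_idx, end_idx]
-- ===== SOURCE B (Python) =====
-- def _trim_token_span_boundaries(prompt_text, offsets, token_span):
--     start_idx, end_idx = token_span
--     meaningful = [
--         i
--         for i in range(start_idx, end_idx)
--         if any(ch.isalnum() for ch in prompt_text[offsets[i][0]:offsets[i][1]])
--     ]
--     if meaningful:
--         return [meaningful[0], meaningful[-1] + 1]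
--     return [end_idx, end_idx] if start_idx < end_idx else [start_idx, end_idx]
-- ===== Notes on version B (the rewrite author's own statement) =====
-- stated objective: alternative
-- what changed: Replaces A's two inward-scanning while loops over the span with a single forward pass that collects the indices of tokens containing an alphanumeric character and derives both boundaries from the first and last such index.
import Mathlib
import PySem

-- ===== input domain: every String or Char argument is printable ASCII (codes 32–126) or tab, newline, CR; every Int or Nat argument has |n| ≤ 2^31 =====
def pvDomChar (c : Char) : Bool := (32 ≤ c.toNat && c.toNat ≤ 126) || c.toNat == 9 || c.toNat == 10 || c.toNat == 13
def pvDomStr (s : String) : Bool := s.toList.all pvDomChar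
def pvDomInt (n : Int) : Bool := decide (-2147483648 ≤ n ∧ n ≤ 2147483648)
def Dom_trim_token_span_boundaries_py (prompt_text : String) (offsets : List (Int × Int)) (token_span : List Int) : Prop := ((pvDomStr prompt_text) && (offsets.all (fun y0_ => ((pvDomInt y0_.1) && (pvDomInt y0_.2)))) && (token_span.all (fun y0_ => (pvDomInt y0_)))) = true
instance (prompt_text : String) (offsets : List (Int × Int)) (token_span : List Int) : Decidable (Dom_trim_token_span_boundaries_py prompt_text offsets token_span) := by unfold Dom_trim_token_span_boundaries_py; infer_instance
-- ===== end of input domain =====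

-- B replaces A's two inward-scanning while loops by one forward pass that collects the
-- meaningful token indices and derives both boundaries from its first and last element
-- (objective: alternative decomposition, same cost).


-- ===== PORT A =====
-- the first while loop: advance start_idx past tokens with no alphanumeric character
def pvLoopUpA (txt : List Char) (offsets : List (Int × Int)) (s e : Int) : Int :=
  if _h : s < e then
    match PySem.List.pyGet? offsets s with
    | none => s
    | some (cs, ce) =>
      let tok := PySem.List.slice txt (some cs) (some ce)
      if !tok.isEmpty && !(tok.all fun ch => PySem.Chars.isspace ch || !PySem.Chars.isalnum ch)
      then s
      else pvLoopUpA txt offsets (s + 1) e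
  else s
termination_by (e - s).toNat
decreasing_by omega

-- the second while loop: retreat end_idx past tokens with no alphanumeric character
def pvLoopDownA (txt : List Char) (offsets : List (Int × Int)) (s e : Int) : Int :=
  if _h : e > s then
    match PySem.List.pyGet? offsets (e - 1) with
    | none => e
    | some (cs, ce) =>
      let tok := PySem.List.slice txt (some cs) (some ce)
      if !tok.isEmpty && !(tok.all fun ch => PySem.Chars.isspace ch || !PySem.Chars.isalnum ch)
      then e
      else pvLoopDownA txt offsets s (e - 1)
  else e
termination_by (e - s).toNat
decreasing_by omega

def trim_token_span_boundaries_py (prompt_text : String) (offsets : List (Int × Int)) (token_span : List Int) : List Int :=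
  match token_span with
  | [s, e] =>
    let s' := pvLoopUpA prompt_text.toList offsets s e
    let e' := pvLoopDownA prompt_text.toList offsets s' e
    [s', e']
  | _ => []

-- ===== PORT B =====
-- does the token at index i contain an alphanumeric character?
def pvMeaningfulB (txt : List Char) (offsets : List (Int × Int)) (i : Int) : Bool :=
  -- none = Python's IndexError, excluded by Pre_; getD false keeps the helper total
  ((PySem.List.pyGet? offsets i).map (fun cb =>
    (PySem.List.slice txt (some cb.1) (some cb.2)).any (fun ch => PySem.Chars.isalnum ch))).getD false

def trim_token_span_boundaries_py_alt (prompt_text : String) (offsets : List (Int × Int)) (token_span : List Int) : List Int :=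
  if token_span.length = 2 then
    let s := PySem.List.pyGetD token_span 0 0
    let e := PySem.List.pyGetD token_span 1 0
    let meaningful := (PySem.List.pyRange s e 1).filter (pvMeaningfulB prompt_text.toList offsets)
    if hm : meaningful ≠ [] then [meaningful.head hm, meaningful.getLast hm + 1]
    else if s < e then [e, e] else [s, e]
  else []           -- Python raises ValueError (unpacking); excluded by Pre_

-- ===== PRECONDITION & SPEC =====
-- Exactly the inputs where the Python A returns: token_span unpacks into two ints (else
-- ValueError), and on a non-degenerate span every index the scans can touch lies in
-- Python's valid (wraparound-inclusive) index range for offsets (else IndexError).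
def Pre_trim_token_span_boundaries_py (prompt_text : String) (offsets : List (Int × Int)) (token_span : List Int) : Prop :=
  token_span.length = 2 ∧
    (PySem.List.pyGetD token_span 0 0 < PySem.List.pyGetD token_span 1 0 →
      (-(offsets.length : Int) ≤ PySem.List.pyGetD token_span 0 0 ∧
        PySem.List.pyGetD token_span 1 0 ≤ (offsets.length : Int)))

instance (prompt_text : String) (offsets : List (Int × Int)) (token_span : List Int) : Decidable (Pre_trim_token_span_boundaries_py prompt_text offsets token_span) := by unfold Pre_trim_token_span_boundaries_py; infer_instance

def pvWitness_trim_token_span_boundaries_py : String × (List (Int × Int)) × List Int :=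
  (" a! ", [(0, 1), (1, 2), (2, 3), (3, 4)], [0, 4])

def Spec_trim_token_span_boundaries_py (prompt_text : String) (offsets : List (Int × Int)) (token_span : List Int) (out : List Int) : Prop := out = trim_token_span_boundaries_py_alt prompt_text offsets token_span
instance (prompt_text : String) (offsets : List (Int × Int)) (token_span : List Int) (out : List Int) : Decidable (Spec_trim_token_span_boundaries_py prompt_text offsets token_span out) := by unfold Spec_trim_token_span_boundaries_py; infer_instance

-- ===== CLAIM (what is proved, stated in full; the proofs are below) =====
def Claim_equal_trim_token_span_boundaries_py : Prop := ∀ (prompt_text : String) (offsets : List (Int × Int)) (token_span : List Int), Dom_trim_token_span_boundaries_py prompt_text offsets token_span → Pre_trim_token_span_boundaries_py prompt_text offsets token_span → Spec_trim_token_span_boundaries_py prompt_text offsets token_span (trim_token_span_boundaries_py prompt_text offsets token_span)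

-- ===== LEMMAS AND PROOFS =====
theorem pv_isalnum_not_isspace (c : Char) : PySem.Chars.isalnum c = true → PySem.Chars.isspace c = false := by
  simp [PySem.Chars.isalnum, PySem.Chars.isspace, PySem.Chars.isalpha, PySem.Chars.isdigit,
        PySem.Chars.isupper, PySem.Chars.islower, Char.le_def, UInt32.le_iff_toNat_le]
  omega

theorem pv_not_g (c : Char) :
    (!PySem.Chars.isspace c && PySem.Chars.isalnum c) = PySem.Chars.isalnum c := by
  cases h : PySem.Chars.isalnum c with
  | false => simp
  | true => simp [pv_isalnum_not_isspace c h]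

theorem pv_cond_eq (tok : List Char) :
    (!tok.isEmpty && !(tok.all fun ch => PySem.Chars.isspace ch || !PySem.Chars.isalnum ch))
      = tok.any (fun ch => PySem.Chars.isalnum ch) := by
  cases tok with
  | nil => simp
  | cons c t =>
    simp only [List.isEmpty_cons, Bool.not_false, Bool.true_and, List.not_all_eq_any_not]
    simp [pv_not_g]

theorem pv_get_some (xs : List (Int × Int)) (i : Int) (h1 : -(xs.length : Int) ≤ i)
    (h2 : i < (xs.length : Int)) : ∃ p, PySem.List.pyGet? xs i = some p := by
  cases hg : PySem.List.pyGet? xs i with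
  | some p => exact ⟨p, rfl⟩
  | none =>
    rw [PySem.List.pyGet?_eq_none_iff] at hg
    exact absurd ⟨h1, h2⟩ hg

theorem pv_loopUp_eq (txt : List Char) (offsets : List (Int × Int)) (s e : Int)
    (hse : s ≤ e) (hs : -(offsets.length : Int) ≤ s) (he : e ≤ (offsets.length : Int)) :
    pvLoopUpA txt offsets s e =
      (((PySem.List.pyRange s e 1).filter (pvMeaningfulB txt offsets)).headD e) := by
  generalize hn : (e - s).toNat = n
  induction n generalizing s with
  | zero =>
    have : s = e := by omega
    subst this
    rw [pvLoopUpA, PySem.List.pyRange_one_eq_nil (le_refl s)]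
    simp
  | succ n ih =>
    have hlt : s < e := by omega
    obtain ⟨⟨cs, ce⟩, hp⟩ := pv_get_some offsets s hs (by omega)
    rw [pvLoopUpA, dif_pos hlt, hp, PySem.List.pyRange_one_cons hlt]
    simp only [List.filter_cons]
    have hcond : (!(PySem.List.slice txt (some cs) (some ce)).isEmpty &&
        !((PySem.List.slice txt (some cs) (some ce)).all fun ch =>
            PySem.Chars.isspace ch || !PySem.Chars.isalnum ch))
        = pvMeaningfulB txt offsets s := by
      rw [pv_cond_eq]; simp [pvMeaningfulB, hp]
    cases hm : pvMeaningfulB txt offsets s with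
    | true => rw [hcond] at *; simp [hm]
    | false =>
      rw [hcond] at *
      simp only [hm, if_neg, Bool.false_eq_true, not_false_iff]
      exact ih (s + 1) (by omega) (by omega) (by omega)

theorem pv_loopDown_eq (txt : List Char) (offsets : List (Int × Int)) (a e : Int)
    (hae : a ≤ e) (ha : -(offsets.length : Int) ≤ a) (he : e ≤ (offsets.length : Int)) :
    pvLoopDownA txt offsets a e =
      (match ((PySem.List.pyRange a e 1).filter (pvMeaningfulB txt offsets)).getLast? with
       | some l => l + 1
       | none => a) := by
  generalize hn : (e - a).toNat = n
  induction n generalizing e with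
  | zero =>
    have : e = a := by omega
    subst this
    rw [pvLoopDownA, PySem.List.pyRange_one_eq_nil (le_refl e)]
    simp
  | succ n ih =>
    have hlt : a < e := by omega
    obtain ⟨⟨cs, ce⟩, hp⟩ := pv_get_some offsets (e - 1) (by omega) (by omega)
    have hsplit : PySem.List.pyRange a e 1 = PySem.List.pyRange a (e - 1) 1 ++ [e - 1] := by
      have h2 := PySem.List.pyRange_one_succ_right (a := a) (b := e - 1) (by omega)
      rw [show e - 1 + 1 = e from by omega] at h2
      exact h2
    have hmb : pvMeaningfulB txt offsets (e - 1)
        = (PySem.List.slice txt (some cs) (some ce)).any (fun ch => PySem.Chars.isalnum ch) := by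
      simp [pvMeaningfulB, hp]
    rw [pvLoopDownA, dif_pos hlt, hp, hsplit, List.filter_append]
    cases hm : (PySem.List.slice txt (some cs) (some ce)).any (fun ch => PySem.Chars.isalnum ch) with
    | true =>
      simp only [pv_cond_eq, hm, if_true, List.filter_cons, hmb, List.filter_nil]
      simp
    | false =>
      simp only [pv_cond_eq, hm, Bool.false_eq_true, if_false, List.filter_cons, hmb,
        List.filter_nil, List.append_nil]
      exact ih (e - 1) (by omega) (by omega) (by omega)

theorem pv_main (txt : List Char) (offsets : List (Int × Int)) (s e : Int)
    (hpre : s < e → (-(offsets.length : Int) ≤ s ∧ e ≤ (offsets.length : Int))) :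
    [pvLoopUpA txt offsets s e, pvLoopDownA txt offsets (pvLoopUpA txt offsets s e) e]
      = (match (PySem.List.pyRange s e 1).filter (pvMeaningfulB txt offsets) with
         | [] => if s < e then [e, e] else [s, e]
         | f :: rest => [f, ((f :: rest).getLast (by simp)) + 1]) := by
  by_cases hlt : s < e
  · obtain ⟨hs, he⟩ := hpre hlt
    rw [pv_loopUp_eq txt offsets s e (le_of_lt hlt) hs he]
    cases hms : (PySem.List.pyRange s e 1).filter (pvMeaningfulB txt offsets) with
    | nil =>
      simp only [List.headD_nil, if_pos hlt]
      rw [pv_loopDown_eq txt offsets e e (le_refl e) (by omega) he,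
        PySem.List.pyRange_one_eq_nil (le_refl e)]
      simp
    | cons f rest =>
      have hfmem : f ∈ PySem.List.pyRange s e 1 := by
        have : f ∈ (PySem.List.pyRange s e 1).filter (pvMeaningfulB txt offsets) := by
          rw [hms]; exact List.mem_cons_self
        exact List.mem_of_mem_filter this
      obtain ⟨hsf, hfe⟩ := PySem.List.mem_pyRange_one.mp hfmem
      simp only [List.headD_cons]
      rw [pv_loopDown_eq txt offsets f e (le_of_lt hfe) (by omega) he]
      have hsplit : PySem.List.pyRange s e 1
          = PySem.List.pyRange s f 1 ++ PySem.List.pyRange f e 1 :=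
        PySem.List.pyRange_one_append s f e hsf (le_of_lt hfe)
      rw [hsplit, List.filter_append] at hms
      have hA : (PySem.List.pyRange s f 1).filter (pvMeaningfulB txt offsets) = [] := by
        cases hA : (PySem.List.pyRange s f 1).filter (pvMeaningfulB txt offsets) with
        | nil => rfl
        | cons x xs =>
          rw [hA] at hms
          have hx : x = f := by
            have := congrArg List.head? hms
            simpa using this
          have hxmem : x ∈ PySem.List.pyRange s f 1 :=
            List.mem_of_mem_filter (by rw [hA]; exact List.mem_cons_self)
          have := (PySem.List.mem_pyRange_one.mp hxmem).2
          omega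
      rw [hA, List.nil_append] at hms
      rw [hms, List.getLast?_eq_some_getLast (l := f :: rest) (h := by simp)]
  · have h1 : pvLoopUpA txt offsets s e = s := by rw [pvLoopUpA, dif_neg hlt]
    rw [h1]
    have h2 : pvLoopDownA txt offsets s e = e := by
      rw [pvLoopDownA, dif_neg (by omega)]
    rw [h2, PySem.List.pyRange_one_eq_nil (by omega)]
    simp [hlt]

theorem pv_match_dite (s e : Int) (l : List Int) :
    (match l with
     | [] => if s < e then [e, e] else [s, e]
     | f :: rest => [f, ((f :: rest).getLast (by simp)) + 1])
    = (if hm : l ≠ [] then [l.head hm, l.getLast hm + 1]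
       else if s < e then [e, e] else [s, e]) := by
  cases l with
  | nil => simp
  | cons f rest => simp [List.head]

-- ===== VERDICT (by name: the statement is the Claim_ definition above) =====
theorem trim_token_span_boundaries_py_spec : Claim_equal_trim_token_span_boundaries_py := by
  intro prompt_text offsets token_span _hdom hpre
  unfold Spec_trim_token_span_boundaries_py
  obtain ⟨hlen, himp⟩ := hpre
  match token_span, hlen with
  | [s, e], _ =>
    have hget0 : PySem.List.pyGetD [s, e] 0 0 = s := by
      simp [PySem.List.pyGetD_ofNat']
    have hget1 : PySem.List.pyGetD [s, e] 1 0 = e := by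
      simp [PySem.List.pyGetD_ofNat']
    rw [hget0, hget1] at himp
    unfold trim_token_span_boundaries_py trim_token_span_boundaries_py_alt
    simp only [hget0, hget1]
    rw [pv_main prompt_text.toList offsets s e himp, pv_match_dite]
    simp
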